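-- pv_equiv track=rewrite | github.com/pacificclimate/nchelpers | nchelpers/iteration.py | opt_chunk_shape
-- ===== SOURCE A (Python) =====
-- def opt_chunk_shape(shape, max_chunk_size):
--     """
--     Return an "optimal" chunk shape of size at most ``max_chunk_size`` for
--     an array of shape ``shape``, for some notion of "optimal". This could
--     easily be changed.
--
--     :param shape: (tuple) array shape
--     :param max_chunk_size: (int) maximum size (element count) of chunk
--     :return: (tuple) chunk shape
--     """
--     n = len(shape)
--     cs = [1] * n
--     size = 1
--     d = n - 1
--     while d >= 0 and size * shape[d] <= max_chunk_size:
--         cs[d] = shape[d]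
--         size *= shape[d]
--         d -= 1
--     if d >= 0:
--         cs[d] = max_chunk_size // size
--     return tuple(cs)
-- ===== SOURCE B (Python) =====
-- def opt_chunk_shape(shape, max_chunk_size):
--     """Staged passes: build the full suffix-product table, pick the cutoff
--     dimension as the last index whose suffix product exceeds the budget,
--     then assemble the result by concatenation (no early-break scan)."""
--     n = len(shape)
--     suf = [1]
--     for x in reversed(shape):
--         suf.append(x * suf[-1])
--     suf.reverse()  # suf[i] == product of shape[i:]
--     bad = [i for i in range(n) if suf[i] > max_chunk_size]
--     if not bad:
--         return tuple(shape)
--     d = bad[-1]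
--     return tuple([1] * d + [max_chunk_size // suf[d + 1]] + list(shape[d + 1:]))
-- ===== Notes on version B (the rewrite author's own statement) =====
-- stated objective: alternative
-- what changed: A's incremental early-break while-loop (running product, index countdown, mutate a prefilled array, post-loop patch) is replaced by staged passes: build the full suffix-product table, select the cutoff as the last index whose suffix product exceeds the budget, and assemble the answer by concatenation; it trades A's early exit for exact full suffix products, so on huge shapes it materialises large integer intermediates that A never forms.
import Mathlib
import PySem

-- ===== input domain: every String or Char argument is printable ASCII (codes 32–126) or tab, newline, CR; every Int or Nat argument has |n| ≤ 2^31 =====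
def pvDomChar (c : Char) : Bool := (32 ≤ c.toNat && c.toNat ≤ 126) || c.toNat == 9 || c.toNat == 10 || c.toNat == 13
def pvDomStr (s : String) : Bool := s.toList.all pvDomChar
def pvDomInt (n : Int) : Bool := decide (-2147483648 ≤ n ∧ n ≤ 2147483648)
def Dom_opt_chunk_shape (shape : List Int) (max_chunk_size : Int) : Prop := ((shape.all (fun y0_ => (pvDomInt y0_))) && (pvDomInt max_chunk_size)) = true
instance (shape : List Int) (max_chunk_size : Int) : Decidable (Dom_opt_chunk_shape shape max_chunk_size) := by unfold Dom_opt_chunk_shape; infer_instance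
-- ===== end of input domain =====

-- B replaces A's incremental early-break while-loop by staged passes: build the full
-- suffix-product table, select the cutoff as the last index whose suffix product
-- exceeds the budget, then assemble the result by concatenation (alternative
-- decomposition, same cost); return values proved equal on all inputs.

-- ===== PORT A =====
-- A's while-loop: d counts down from n-1; here fuel t = d+1, so t = 0 means d = -1.
-- Returns (cs, size, d) as at loop exit.  shape[d] is always in range in A, ported as getD.
def optA_go (shape : List Int) (mcs : Int) : Nat → List Int → Int → (List Int × Int × Int)
  | 0, cs, size => (cs, size, -1)
  | t+1, cs, size =>
    let sd := shape.getD t 0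
    if size * sd ≤ mcs then optA_go shape mcs t (cs.set t sd) (size * sd)
    else (cs, size, (t : Int))

def opt_chunk_shape (shape : List Int) (max_chunk_size : Int) : List Int :=
  let n := shape.length
  let r := optA_go shape max_chunk_size n (List.replicate n 1) 1
  if 0 ≤ r.2.2 then r.1.set r.2.2.toNat (PySem.Int.floordiv max_chunk_size r.2.1) else r.1

-- ===== PORT B =====
-- B's suffix-product table: suf[i] = product of shape[i:], built by the append loop
-- over reversed(shape) followed by an in-place reverse, exactly as in Source B
def optB_suf (shape : List Int) : List Int :=
  (shape.reverse.foldl (fun acc x => acc ++ [x * acc.getLastD 1]) [1]).reverse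

def opt_chunk_shape_alt (shape : List Int) (max_chunk_size : Int) : List Int :=
  let n := shape.length
  let suf := optB_suf shape
  let bad := (List.range n).filter (fun i => decide (max_chunk_size < suf.getD i 0))
  match bad.getLast? with
  | none => shape
  | some d => List.replicate d 1 ++ [PySem.Int.floordiv max_chunk_size (suf.getD (d+1) 0)] ++ shape.drop (d+1)

-- ===== PRECONDITION & SPEC =====
def Spec_opt_chunk_shape (shape : List Int) (max_chunk_size : Int) (out : List Int) : Prop := out = opt_chunk_shape_alt shape max_chunk_size
instance (shape : List Int) (max_chunk_size : Int) (out : List Int) : Decidable (Spec_opt_chunk_shape shape max_chunk_size out) := by unfold Spec_opt_chunk_shape; infer_instance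

-- ===== CLAIM (what is proved, stated in full; the proofs are below) =====
def Claim_equal_opt_chunk_shape : Prop := ∀ (shape : List Int) (max_chunk_size : Int), Dom_opt_chunk_shape shape max_chunk_size → Spec_opt_chunk_shape shape max_chunk_size (opt_chunk_shape shape max_chunk_size)

-- ===== LEMMAS AND PROOFS =====

-- reference: scan a (reversed) dimension list left-to-right while the running product fits;
-- returns (number of dims consumed, final product)
def pvCore (mcs : Int) : List Int → Int → Nat × Int
  | [], size => (0, size)
  | x :: rs, size =>
    if size * x ≤ mcs then
      let r := pvCore mcs rs (size * x)
      (r.1 + 1, r.2)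
    else (0, size)

theorem pvCore_le (mcs : Int) : ∀ (rs : List Int) (size : Int), (pvCore mcs rs size).1 ≤ rs.length := by
  intro rs
  induction rs with
  | nil => intro size; simp [pvCore]
  | cons x rs ih =>
    intro size
    simp only [pvCore, List.length_cons]
    split
    · have := ih (size * x); omega
    · omega

theorem pvCore_snd (mcs : Int) : ∀ (rs : List Int) (size : Int),
    (pvCore mcs rs size).2 = size * (rs.take (pvCore mcs rs size).1).prod := by
  intro rs
  induction rs with
  | nil => intro size; simp [pvCore]
  | cons x rs ih =>
    intro size
    simp only [pvCore]
    split
    · simp only [List.take_succ_cons, List.prod_cons]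
      rw [ih (size * x)]; ring
    · simp

theorem pvCore_fit (mcs : Int) : ∀ (rs : List Int) (size : Int) (j : Nat),
    j < (pvCore mcs rs size).1 → size * (rs.take (j+1)).prod ≤ mcs := by
  intro rs
  induction rs with
  | nil => intro size j h; simp [pvCore] at h
  | cons x rs ih =>
    intro size j h
    simp only [pvCore] at h
    by_cases hc : size * x ≤ mcs
    · rw [if_pos hc] at h
      cases j with
      | zero => simpa using hc
      | succ j' =>
        simp only [List.take_succ_cons, List.prod_cons]
        have := ih (size * x) j' (by omega)
        calc size * (x * (rs.take (j'+1)).prod) = size * x * (rs.take (j'+1)).prod := by ring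
          _ ≤ mcs := this
    · rw [if_neg hc] at h; omega
  
theorem pvCore_stop (mcs : Int) : ∀ (rs : List Int) (size : Int),
    (pvCore mcs rs size).1 < rs.length → mcs < size * (rs.take ((pvCore mcs rs size).1 + 1)).prod := by
  intro rs
  induction rs with
  | nil => intro size h; simp [pvCore] at h
  | cons x rs ih =>
    intro size h
    simp only [pvCore] at h ⊢
    by_cases hc : size * x ≤ mcs
    · rw [if_pos hc] at h ⊢
      simp only [List.take_succ_cons, List.prod_cons]
      have := ih (size * x) (by simp at h; omega)
      calc mcs < size * x * (rs.take ((pvCore mcs rs (size*x)).1 + 1)).prod := this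
        _ = size * (x * (rs.take ((pvCore mcs rs (size*x)).1 + 1)).prod) := by ring
    · rw [if_neg hc] at h ⊢
      simp only [List.take_succ_cons]
      simp at hc ⊢
      simpa using hc

theorem set_replicate_one (v : Int) : ∀ (m i : Nat), i < m →
    (List.replicate m (1 : Int)).set i v = List.replicate i 1 ++ v :: List.replicate (m - i - 1) 1 := by
  intro m
  induction m with
  | zero => omega
  | succ m ih =>
    intro i hi
    cases i with
    | zero => simp [List.replicate_succ]
    | succ i =>
      have harith : m + 1 - (i + 1) - 1 = m - i - 1 := by omega
      simp only [List.replicate_succ, List.set_cons_succ, harith]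
      rw [ih i (by omega)]
      simp

theorem optA_go_spec (shape : List Int) (mcs : Int) :
    ∀ (t : Nat), t ≤ shape.length → ∀ (size : Int),
    optA_go shape mcs t (List.replicate t 1 ++ shape.drop t) size =
      (List.replicate (t - (pvCore mcs ((shape.take t).reverse) size).1) 1 ++
         shape.drop (t - (pvCore mcs ((shape.take t).reverse) size).1),
       (pvCore mcs ((shape.take t).reverse) size).2,
       (t : Int) - (pvCore mcs ((shape.take t).reverse) size).1 - 1) := by
  intro t
  induction t with
  | zero => intro _ size; simp [optA_go, pvCore]
  | succ t ih =>
    intro ht size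
    have htlt : t < shape.length := by omega
    have hget : shape.getD t 0 = shape[t] := by
      simp [List.getD, List.getElem?_eq_getElem htlt]
    have htake : (shape.take (t+1)).reverse = shape[t] :: (shape.take t).reverse := by
      rw [List.take_add_one]
      simp [List.getElem?_eq_getElem htlt]
    have hdrop : shape.drop t = shape[t] :: shape.drop (t+1) :=
      List.drop_eq_getElem_cons htlt
    have hset : (List.replicate (t+1) (1:Int) ++ shape.drop (t+1)).set t shape[t]
        = List.replicate t 1 ++ shape.drop t := by
      rw [List.set_append_left _ _ (by simp),
          set_replicate_one shape[t] (t+1) t (by omega), hdrop]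
      simp
    simp only [optA_go, hget, htake]
    by_cases hc : size * shape[t] ≤ mcs
    · rw [if_pos hc, hset, ih (by omega) (size * shape[t])]
      simp only [pvCore, if_pos hc]
      refine Prod.ext ?_ (Prod.ext rfl ?_)
      · have harith : t + 1 - ((pvCore mcs ((shape.take t).reverse) (size * shape[t])).1 + 1)
            = t - (pvCore mcs ((shape.take t).reverse) (size * shape[t])).1 := by omega
        simp [harith]
      · simp only []
        push_cast
        ring
    · rw [if_neg hc]
      simp only [pvCore, if_neg hc]
      refine Prod.ext ?_ (Prod.ext rfl ?_)
      · simp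
      · simp only []
        push_cast
        ring

-- reference shape of B's suffix list: pvF sh = [prod sh[0:], prod sh[1:], …, 1]
def pvF : List Int → List Int
  | [] => [1]
  | x :: sh => (x * (pvF sh).headD 1) :: pvF sh

theorem pvF_head : ∀ (sh : List Int), (pvF sh).headD 1 = sh.prod := by
  intro sh
  induction sh with
  | nil => simp [pvF]
  | cons x sh ih =>
    simp only [pvF, List.headD_cons, List.prod_cons]
    rw [ih]

theorem optB_suf_eq : ∀ (shape : List Int), optB_suf shape = pvF shape := by
  intro shape
  induction shape with
  | nil => simp [optB_suf, pvF]
  | cons x sh ih =>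
    unfold optB_suf at ih ⊢
    have hlast : ∀ (l : List Int), l.getLastD 1 = l.reverse.headD 1 := by
      intro l
      cases h : l.reverse with
      | nil => simp [List.reverse_eq_nil_iff.mp h]
      | cons a as =>
        have : l = (a :: as).reverse := by rw [← h, List.reverse_reverse]
        subst this
        simp
    rw [List.reverse_cons, List.foldl_append]
    simp only [List.foldl_cons, List.foldl_nil, pvF]
    rw [List.reverse_append]
    simp only [List.reverse_cons, List.reverse_nil, List.nil_append, List.singleton_append]
    rw [hlast, ih, pvF_head]

theorem pvF_getD : ∀ (sh : List Int) (i : Nat), i ≤ sh.length →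
    (pvF sh).getD i 0 = (sh.drop i).prod := by
  intro sh
  induction sh with
  | nil =>
    intro i hi
    have h0 : i = 0 := Nat.le_zero.mp (by simpa using hi)
    subst h0; simp [pvF]
  | cons x sh ih =>
    intro i hi
    cases i with
    | zero =>
      simp only [pvF, List.getD_cons_zero, List.drop_zero, List.prod_cons]
      rw [pvF_head]
    | succ i => simpa [pvF] using ih i (by simpa using Nat.lt_succ_iff.mp (by simpa using hi))

theorem last_filter_range (p : Nat → Bool) : ∀ (n d : Nat), d < n → p d = true →
    (∀ i, d < i → i < n → p i = false) → ((List.range n).filter p).getLast? = some d := by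
  intro n
  induction n with
  | zero => intro d h; omega
  | succ m ih =>
    intro d hd hp hrest
    rw [List.range_succ, List.filter_append]
    by_cases hdm : d = m
    · subst hdm
      have hfm : List.filter p [d] = [d] := by simp [hp]
      rw [hfm, List.getLast?_concat]
    · have hm : p m = false := hrest m (by omega) (by omega)
      have hfm : List.filter p [m] = [] := by simp [hm]
      rw [hfm, List.append_nil]
      exact ih d (by omega) hp (fun i h1 h2 => hrest i h1 (by omega))

theorem filter_range_nil (p : Nat → Bool) (n : Nat) (h : ∀ i, i < n → p i = false) :
    (List.range n).filter p = [] := by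
  rw [List.filter_eq_nil_iff]
  intro a ha
  simp [h a (List.mem_range.mp ha)]

-- product of a prefix of the reversed list = product of the corresponding suffix
theorem prod_take_reverse (shape : List Int) (j : Nat) :
    ((shape.reverse.take j).prod) = (shape.drop (shape.length - j)).prod := by
  rw [List.take_reverse]
  simp

theorem opt_eq (shape : List Int) (mcs : Int) :
    opt_chunk_shape shape mcs = opt_chunk_shape_alt shape mcs := by
  unfold opt_chunk_shape opt_chunk_shape_alt
  have hA := optA_go_spec shape mcs shape.length (le_refl _) 1
  rw [List.take_length, List.drop_length, List.append_nil] at hA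
  simp only [hA, optB_suf_eq]
  have hkle : (pvCore mcs shape.reverse 1).1 ≤ shape.length := by
    have := pvCore_le mcs shape.reverse 1
    simpa using this
  set k := (pvCore mcs shape.reverse 1).1 with hk
  set s := (pvCore mcs shape.reverse 1).2 with hs
  set n := shape.length with hn
  -- characterize the suffix-product predicate via pvCore
  have hsuf : ∀ i, i ≤ n → (pvF shape).getD i 0 = (shape.drop i).prod :=
    fun i hi => pvF_getD shape i hi
  have hfit : ∀ i, n - k ≤ i → i < n → ¬ (mcs < (pvF shape).getD i 0) := by
    intro i h1 h2
    rw [hsuf i (by omega)]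
    have hj : i = n - (n - i) := by omega
    have := pvCore_fit mcs shape.reverse 1 (n - i - 1) (by omega)
    rw [one_mul] at this
    have harith : n - i - 1 + 1 = n - i := by omega
    rw [harith, prod_take_reverse] at this
    simp only [← hn] at this
    rw [hj]
    omega
  by_cases hkn : k = n
  · -- everything fits: both sides return shape itself
    have hbad : ((List.range n).filter (fun i => decide (mcs < (pvF shape).getD i 0))) = [] := by
      apply filter_range_nil
      intro i hi
      simp only [decide_eq_false_iff_not]
      exact hfit i (by omega) hi
    rw [if_neg (by simp; omega)]
    simp only [hbad, List.getLast?_nil]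
    simp [hkn]
  · -- cutoff at dimension d = n - k - 1
    have hklt : k < n := by omega
    have hstop : mcs < (pvF shape).getD (n - k - 1) 0 := by
      rw [hsuf (n - k - 1) (by omega)]
      have := pvCore_stop mcs shape.reverse 1 (by simpa using hklt)
      rw [one_mul, prod_take_reverse] at this
      simp only [← hn] at this
      have harith : n - (k + 1) = n - k - 1 := by omega
      rw [harith] at this
      exact this
    have hbad : ((List.range n).filter (fun i => decide (mcs < (pvF shape).getD i 0))).getLast?
        = some (n - k - 1) := by
      apply last_filter_range _ n (n - k - 1) (by omega) (by simpa using hstop)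
      intro i h1 h2
      simp only [decide_eq_false_iff_not]
      exact hfit i (by omega) h2
    rw [if_pos (by simp; omega)]
    simp only [hbad]
    have hdp1 : n - k - 1 + 1 = n - k := by omega
    have hsval : (pvF shape).getD (n - k - 1 + 1) 0 = s := by
      rw [hdp1, hsuf (n - k) (by omega), hs, pvCore_snd, one_mul, prod_take_reverse]
    rw [hsval]
    have htn : (((n : Int) - k - 1)).toNat = n - k - 1 := by omega
    simp only [htn]
    have htr : (shape.reverse.take k).reverse = shape.drop (n - k) := by
      rw [List.take_reverse, List.reverse_reverse, ← hn]
    rw [List.set_append_left _ _ (by simp; omega),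
        set_replicate_one _ (n - k) (n - k - 1) (by omega)]
    have h0 : n - k - (n - k - 1) - 1 = 0 := by omega
    rw [h0, hdp1]
    simp

-- ===== VERDICT (by name: the statement is the Claim_ definition above) =====
theorem opt_chunk_shape_spec : Claim_equal_opt_chunk_shape := by
  intro shape mcs _
  unfold Spec_opt_chunk_shape
  exact opt_eq shape mcs
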